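-- pv_equiv track=rewrite | github.com/kama-jaworska/aoc2020 | 04/main.py | create_passport_dict
-- ===== SOURCE A (Python) =====
-- def create_passport_dict(input_file_lines):
--     passports = {}
--     passport_id = 0
--
--     for line in input_file_lines:
--         if passport_id not in passports:
--             passports[passport_id] = {}
--
--         if line == []:
--             passport_id += 1
--             continue
--
--         for item in line:
--             key_val = item.split(":")
--             passports[passport_id][key_val[0]] = key_val[1]
--
--     return passports
-- ===== SOURCE B (Python) =====
-- def create_passport_dict(input_file_lines):
--     if not input_file_lines:
--         return {}
--     # pass 1: partition lines into groups of items, separated by empty lines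
--     groups = [[]]
--     for line in input_file_lines:
--         if line == []:
--             groups.append([])
--         else:
--             groups[-1].extend(line)
--     if input_file_lines[-1] == []:
--         groups.pop()  # a trailing separator adds no passport
--     # pass 2: build the numbered field dictionaries
--     return {
--         i: {item.split(":")[0]: item.split(":")[1] for item in group}
--         for i, group in enumerate(groups)
--     }
-- ===== Notes on version B (the rewrite author's own statement) =====
-- stated objective: simpler
-- what changed: A's single counter-driven pass that mutates a dict-of-dicts keyed by a running passport id is replaced by two plain passes: first partition the lines into groups of items (popping the group a trailing blank line opens), then build the numbered field dictionaries from the groups by enumeration.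
import Mathlib
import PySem

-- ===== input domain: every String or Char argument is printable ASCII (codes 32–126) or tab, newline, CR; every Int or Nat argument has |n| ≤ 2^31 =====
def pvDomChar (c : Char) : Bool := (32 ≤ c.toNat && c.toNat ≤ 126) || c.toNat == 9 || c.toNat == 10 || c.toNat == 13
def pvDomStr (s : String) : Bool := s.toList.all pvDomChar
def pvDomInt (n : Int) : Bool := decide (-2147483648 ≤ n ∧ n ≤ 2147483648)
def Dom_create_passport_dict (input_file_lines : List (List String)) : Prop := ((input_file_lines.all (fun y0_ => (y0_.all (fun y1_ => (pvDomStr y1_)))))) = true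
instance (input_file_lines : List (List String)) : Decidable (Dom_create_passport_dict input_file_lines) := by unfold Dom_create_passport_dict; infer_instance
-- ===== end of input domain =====

-- B replaces A's single counter-driven pass over a mutable dict-of-dicts by two plain passes:
-- partition the lines into groups of items, then build the numbered field dictionaries
-- from the groups (objective: simpler; not measurably faster).

-- ===== PORT A =====
-- passports[passport_id][key_val[0]] = key_val[1]  (key_val = item.split(":"))
def pvAInner (pid : Int) (d : PySem.Dict Int (PySem.Dict String String)) (item : String) :
    PySem.Dict Int (PySem.Dict String String) :=
  let key_val := (PySem.Str.split? item ":").getD []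
  d.modify pid PySem.Dict.empty (fun inner =>
    inner.insert ((PySem.List.pyGet? key_val 0).getD "") ((PySem.List.pyGet? key_val 1).getD ""))

-- one iteration of A's "for line in input_file_lines" loop; state = (passports, passport_id)
def pvALine (st : PySem.Dict Int (PySem.Dict String String) × Int) (line : List String) :
    PySem.Dict Int (PySem.Dict String String) × Int :=
  let passports := if st.1.contains st.2 then st.1 else st.1.insert st.2 PySem.Dict.empty
  if line = [] then (passports, st.2 + 1)
  else (line.foldl (pvAInner st.2) passports, st.2)

def create_passport_dict (input_file_lines : List (List String)) : List (Int × List (String × String)) :=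
  let fin := input_file_lines.foldl pvALine (PySem.Dict.empty, 0)
  fin.1.items.map (fun p => (p.1, p.2.items))

-- ===== PORT B =====
-- groups.append([]) on a blank line, else groups[-1].extend(line); the groups are kept
-- reversed (head = current group) so the in-place extend is a head update
def pvGroupStep (acc : List (List String)) (line : List String) : List (List String) :=
  if line = [] then [] :: acc
  else match acc with
       | g :: rest => (g ++ line) :: rest
       | [] => [line]

-- {item.split(":")[0]: item.split(":")[1] for item in group}
def pvFields (group : List String) : PySem.Dict String String :=
  group.foldl (fun d item =>
    d.insert ((PySem.List.pyGet? ((PySem.Str.split? item ":").getD []) 0).getD "")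
             ((PySem.List.pyGet? ((PySem.Str.split? item ":").getD []) 1).getD "")) PySem.Dict.empty

def create_passport_dict_alt (input_file_lines : List (List String)) : List (Int × List (String × String)) :=
  if input_file_lines = [] then []
  else
    let groups := (input_file_lines.foldl pvGroupStep [[]]).reverse
    let groups := if PySem.List.pyGet? input_file_lines (-1) = some ([] : List String)
                  then groups.dropLast else groups
    ((PySem.List.enumerate groups 0).foldl
        (fun d p => d.insert p.1 (pvFields p.2)) PySem.Dict.empty).items.map
      (fun p => (p.1, p.2.items))

-- ===== PRECONDITION & SPEC =====
-- Pre_ excludes exactly the inputs on which Python A raises IndexError: an item with no ":"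
-- makes item.split(":")[1] fail (B raises there in the same way).
def Pre_create_passport_dict (input_file_lines : List (List String)) : Prop :=
  ∀ line ∈ input_file_lines, ∀ item ∈ line, ':' ∈ item.toList
instance (input_file_lines : List (List String)) : Decidable (Pre_create_passport_dict input_file_lines) := by unfold Pre_create_passport_dict; infer_instance

def pvWitness_create_passport_dict : List (List String) :=
  [["ecl:gry", "pid:860033327"], [], ["eyr:2029"], []]

def Spec_create_passport_dict (input_file_lines : List (List String)) (out : List (Int × List (String × String))) : Prop := out = create_passport_dict_alt input_file_lines
instance (input_file_lines : List (List String)) (out : List (Int × List (String × String))) : Decidable (Spec_create_passport_dict input_file_lines out) := by unfold Spec_create_passport_dict; infer_instance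

-- ===== CLAIM (what is proved, stated in full; the proofs are below) =====
def Claim_equal_create_passport_dict : Prop := ∀ (input_file_lines : List (List String)), Dom_create_passport_dict input_file_lines → Pre_create_passport_dict input_file_lines → Spec_create_passport_dict input_file_lines (create_passport_dict input_file_lines)

-- ===== LEMMAS AND PROOFS =====

-- the field insertion both programs perform for one "k:v" item
def pvIns (d : PySem.Dict String String) (item : String) : PySem.Dict String String :=
  let key_val := (PySem.Str.split? item ":").getD []
  d.insert ((PySem.List.pyGet? key_val 0).getD "") ((PySem.List.pyGet? key_val 1).getD "")

-- A's loop result expressed recursively; cur = the dict of the current passport id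
-- (none right after an id bump, before any line of the new passport was seen)
def pvSpec : List (List String) → Option (PySem.Dict String String) → Int →
    List (Int × PySem.Dict String String)
  | [], none, _ => []
  | [], some c, pid => [(pid, c)]
  | l :: ls, cur, pid =>
    if l = [] then (pid, cur.getD PySem.Dict.empty) :: pvSpec ls none (pid + 1)
    else pvSpec ls (some (l.foldl pvIns (cur.getD PySem.Dict.empty))) pid

def pvOptEntry : Option (PySem.Dict String String) → Int → List (Int × PySem.Dict String String)
  | none, _ => []
  | some c, pid => [(pid, c)]

-- B's grouping without the trailing pop, with it folded in, and the dict list it yields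
def pvGrpPlain : List (List String) → List String → List (List String)
  | [], g => [g]
  | l :: ls, g => if l = [] then g :: pvGrpPlain ls [] else pvGrpPlain ls (g ++ l)

def pvGrp : List (List String) → List String → List (List String)
  | [], g => [g]
  | l :: ls, g => if l = [] then g :: (if ls = [] then [] else pvGrp ls []) else pvGrp ls (g ++ l)

def pvBuild : List (List String) → Int → List (Int × PySem.Dict String String)
  | [], _ => []
  | g :: gs, pid => (pid, g.foldl pvIns PySem.Dict.empty) :: pvBuild gs (pid + 1)

theorem pv_get_last (prev : List (Int × PySem.Dict String String)) (pid : Int)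
    (c : PySem.Dict String String) (h : ∀ p ∈ prev, p.1 ≠ pid) :
    (PySem.Dict.mk (prev ++ [(pid, c)])).get? pid = some c := by
  simp only [PySem.Dict.get?, List.find?_append]
  rw [List.find?_eq_none.2 (by intro p hp; simpa using h p hp)]
  simp

theorem pv_contains_last (prev : List (Int × PySem.Dict String String)) (pid : Int)
    (c : PySem.Dict String String) (h : ∀ p ∈ prev, p.1 ≠ pid) :
    (PySem.Dict.mk (prev ++ [(pid, c)])).contains pid = true := by
  rw [PySem.Dict.contains_eq_isSome_get?, pv_get_last prev pid c h]; rfl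

theorem pv_contains_fresh (prev : List (Int × PySem.Dict String String)) (pid : Int)
    (h : ∀ p ∈ prev, p.1 ≠ pid) :
    (PySem.Dict.mk prev).contains pid = false := by
  simp only [PySem.Dict.contains, List.any_eq_false]
  intro p hp; simpa using h p hp

theorem pv_modify_last (prev : List (Int × PySem.Dict String String)) (pid : Int)
    (c : PySem.Dict String String) (f : PySem.Dict String String → PySem.Dict String String)
    (h : ∀ p ∈ prev, p.1 ≠ pid) :
    (PySem.Dict.mk (prev ++ [(pid, c)])).modify pid PySem.Dict.empty f
      = PySem.Dict.mk (prev ++ [(pid, f c)]) := by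
  have hg := pv_get_last prev pid c h
  simp only [PySem.Dict.modify, PySem.Dict.getD_eq_get?_getD, hg, Option.getD_some]
  apply PySem.Dict.ext
  rw [PySem.Dict.items_insert_of_contains _ _ (pv_contains_last prev pid c h)]
  simp only [List.map_append]
  congr 1
  · conv_rhs => rw [← List.map_id prev]
    refine List.map_congr_left fun p hp => ?_
    simp [show p.1 ≠ pid from h p hp]
  · simp

theorem pv_AInner_eq (pid : Int) (d : PySem.Dict Int (PySem.Dict String String)) (item : String) :
    pvAInner pid d item = d.modify pid PySem.Dict.empty (fun inner => pvIns inner item) := rfl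

theorem pv_inner_fold' (prev : List (Int × PySem.Dict String String)) (pid : Int)
    (h : ∀ p ∈ prev, p.1 ≠ pid) :
    ∀ (line : List String) (c : PySem.Dict String String),
    line.foldl (pvAInner pid) (PySem.Dict.mk (prev ++ [(pid, c)]))
      = PySem.Dict.mk (prev ++ [(pid, line.foldl pvIns c)]) := by
  intro line
  induction line with
  | nil => intro c; rfl
  | cons item rest ih =>
    intro c
    rw [List.foldl_cons, pv_AInner_eq, pv_modify_last prev pid c _ h, ih, List.foldl_cons]

theorem pv_insert_fresh (prev : List (Int × PySem.Dict String String)) (pid : Int)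
    (h : ∀ p ∈ prev, p.1 ≠ pid) :
    (PySem.Dict.mk prev).insert pid PySem.Dict.empty
      = PySem.Dict.mk (prev ++ [(pid, PySem.Dict.empty)]) := by
  apply PySem.Dict.ext
  rw [PySem.Dict.items_insert_of_not_contains _ _ (pv_contains_fresh prev pid h)]

theorem pv_A_loop (lines : List (List String)) :
    ∀ (prev : List (Int × PySem.Dict String String))
      (cur : Option (PySem.Dict String String)) (pid : Int),
    (∀ p ∈ prev, p.1 < pid) →
    (lines.foldl pvALine (PySem.Dict.mk (prev ++ pvOptEntry cur pid), pid)).1.items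
      = prev ++ pvSpec lines cur pid := by
  induction lines with
  | nil =>
    intro prev cur pid _
    cases cur <;> simp [pvOptEntry, pvSpec]
  | cons line ls ih =>
    intro prev cur pid h
    have hne : ∀ p ∈ prev, p.1 ≠ pid := fun p hp => ne_of_lt (h p hp)
    rw [List.foldl_cons]
    -- reduce the setdefault step: passports = mk (prev ++ [(pid, c0)])
    have hstep : pvALine (PySem.Dict.mk (prev ++ pvOptEntry cur pid), pid) line
        = (if line = [] then (PySem.Dict.mk (prev ++ [(pid, cur.getD PySem.Dict.empty)]), pid + 1)
           else (PySem.Dict.mk (prev ++ [(pid, line.foldl pvIns (cur.getD PySem.Dict.empty))]), pid)) := by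
      cases cur with
      | none =>
        simp only [pvOptEntry, List.append_nil, pvALine,
          pv_contains_fresh prev pid hne, if_false, Bool.false_eq_true,
          pv_insert_fresh prev pid hne, Option.getD_none]
        rw [pv_inner_fold' prev pid hne]
      | some c =>
        simp only [pvOptEntry, pvALine, pv_contains_last prev pid c hne, if_true,
          Option.getD_some]
        rw [pv_inner_fold' prev pid hne]
    rw [hstep]
    by_cases hl : line = []
    · subst hl
      rw [if_pos rfl]
      have h' : ∀ p ∈ prev ++ [(pid, cur.getD PySem.Dict.empty)], p.1 < pid + 1 := by
        intro p hp
        rcases List.mem_append.1 hp with h1 | h1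
        · have := h p h1; omega
        · simp only [List.mem_singleton] at h1; subst h1; omega
      have hih := ih (prev ++ [(pid, cur.getD PySem.Dict.empty)]) none (pid + 1) h'
      simp only [pvOptEntry, List.append_nil] at hih
      rw [hih]
      simp [pvSpec]
    · rw [if_neg hl]
      have hih := ih prev (some (line.foldl pvIns (cur.getD PySem.Dict.empty))) pid h
      simp only [pvOptEntry] at hih
      rw [hih]
      simp [pvSpec, hl]

theorem pvSpec_cons (l : List String) (ls : List (List String))
    (cur : Option (PySem.Dict String String)) (pid : Int) :
    pvSpec (l :: ls) cur pid
      = if l = [] then (pid, cur.getD PySem.Dict.empty) :: pvSpec ls none (pid + 1)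
        else pvSpec ls (some (l.foldl pvIns (cur.getD PySem.Dict.empty))) pid := by
  rw [pvSpec]

theorem pvGrp_cons (l : List String) (ls : List (List String)) (g : List String) :
    pvGrp (l :: ls) g
      = if l = [] then g :: (if ls = [] then [] else pvGrp ls []) else pvGrp ls (g ++ l) := by
  rw [pvGrp]

theorem pvGrpPlain_cons (l : List String) (ls : List (List String)) (g : List String) :
    pvGrpPlain (l :: ls) g
      = if l = [] then g :: pvGrpPlain ls [] else pvGrpPlain ls (g ++ l) := by
  rw [pvGrpPlain]

theorem pv_spec_none (l : List String) (ls : List (List String)) (pid : Int) :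
    pvSpec (l :: ls) none pid = pvSpec (l :: ls) (some PySem.Dict.empty) pid := rfl

theorem pv_spec_build (ls : List (List String)) :
    ∀ (g : List String) (pid : Int),
    pvSpec ls (some (g.foldl pvIns PySem.Dict.empty)) pid = pvBuild (pvGrp ls g) pid := by
  induction ls with
  | nil => intro g pid; rfl
  | cons l ls ih =>
    intro g pid
    by_cases hl : l = []
    · subst hl
      rw [pvSpec_cons, if_pos rfl, pvGrp_cons, if_pos rfl, pvBuild, Option.getD_some]
      congr 1
      cases ls with
      | nil => rfl
      | cons l2 ls2 =>
        rw [if_neg (List.cons_ne_nil l2 ls2), pv_spec_none]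
        exact ih [] (pid + 1)
    · rw [pvSpec_cons, if_neg hl, pvGrp_cons, if_neg hl, Option.getD_some, ← List.foldl_append]
      exact ih (g ++ l) pid

theorem pv_foldl_grp (ls : List (List String)) :
    ∀ (acc : List (List String)) (g : List String),
    (ls.foldl pvGroupStep (g :: acc)).reverse = acc.reverse ++ pvGrpPlain ls g := by
  induction ls with
  | nil => intro acc g; simp [pvGrpPlain]
  | cons l ls ih =>
    intro acc g
    by_cases hl : l = []
    · subst hl
      rw [List.foldl_cons, show pvGroupStep (g :: acc) [] = [] :: g :: acc from rfl, ih,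
        pvGrpPlain_cons, if_pos rfl]
      simp
    · rw [List.foldl_cons, show pvGroupStep (g :: acc) l = (g ++ l) :: acc from by
        simp [pvGroupStep, hl], ih, pvGrpPlain_cons, if_neg hl]

theorem pv_grpPlain_ne_nil (ls : List (List String)) :
    ∀ (g : List String), pvGrpPlain ls g ≠ [] := by
  induction ls with
  | nil => intro g; simp [pvGrpPlain]
  | cons l ls ih =>
    intro g
    rw [pvGrpPlain_cons]
    by_cases hl : l = []
    · simp [hl]
    · rw [if_neg hl]; exact ih (g ++ l)

theorem pv_pop_grp (ls : List (List String)) (h : ls ≠ []) :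
    ∀ (g : List String),
    (if ls.getLast? = some ([] : List String)
     then (pvGrpPlain ls g).dropLast else pvGrpPlain ls g) = pvGrp ls g := by
  induction ls with
  | nil => exact absurd rfl h
  | cons l ls ih =>
    intro g
    cases ls with
    | nil =>
      by_cases hl : l = []
      · subst hl; simp [pvGrpPlain, pvGrp]
      · simp [pvGrpPlain, pvGrp, hl, List.getLast?_singleton]
    | cons l2 ls2 =>
      have hlast : (l :: l2 :: ls2).getLast? = (l2 :: ls2).getLast? :=
        List.getLast?_cons_cons ..
      rw [hlast, pvGrpPlain_cons, pvGrp_cons]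
      by_cases hl : l = []
      · rw [if_pos hl, if_pos hl, if_neg (List.cons_ne_nil l2 ls2)]
        by_cases hc : (l2 :: ls2).getLast? = some ([] : List String)
        · rw [if_pos hc, List.dropLast_cons_of_ne_nil (pv_grpPlain_ne_nil _ _)]
          congr 1
          have := ih (List.cons_ne_nil l2 ls2) []
          rwa [if_pos hc] at this
        · rw [if_neg hc]
          congr 1
          have := ih (List.cons_ne_nil l2 ls2) []
          rwa [if_neg hc] at this
      · rw [if_neg hl, if_neg hl]
        exact ih (List.cons_ne_nil l2 ls2) (g ++ l)

theorem pv_pyGetLast (ls : List (List String)) (h : ls ≠ []) :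
    PySem.List.pyGet? ls (-1) = ls.getLast? := by
  have hn : 0 < ls.length := List.length_pos_iff.2 h
  simp only [PySem.List.pyGet?, PySem.List.pyIdx?]
  rw [if_neg (by omega), if_pos (by omega)]
  simp only [Option.bind_some]
  rw [List.getLast?_eq_getElem?]
  rfl

theorem pv_enum_build (gs : List (List String)) :
    ∀ (n : Int),
    (PySem.List.enumerate gs n).map (fun p => (p.1, pvFields p.2)) = pvBuild gs n := by
  induction gs with
  | nil => intro n; rfl
  | cons g gs ih =>
    intro n
    rw [PySem.List.enumerate_cons, List.map_cons, ih (n + 1), pvBuild]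
    rfl

theorem pv_alt_eq (ls : List (List String)) :
    create_passport_dict_alt ls
      = (pvSpec ls none 0).map (fun p => (p.1, p.2.items)) := by
  cases ls with
  | nil => rfl
  | cons l ls' =>
    have h : (l :: ls') ≠ [] := List.cons_ne_nil _ _
    simp only [create_passport_dict_alt, if_neg h]
    rw [show ([[]] : List (List String)) = [] :: [] from rfl, pv_foldl_grp, List.reverse_nil,
      List.nil_append, pv_pyGetLast _ h, pv_pop_grp _ h]
    have hnd : ((PySem.List.enumerate (pvGrp (l :: ls') []) 0).map
        (fun (p : Int × List String) => p.1)).Nodup :=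
      (List.pairwise_map).2 ((PySem.List.pairwise_lt_enumerate _ _).imp
        (fun hpq => ne_of_lt hpq))
    rw [PySem.Dict.items_foldl_insert_fresh _ (fun (p : Int × List String) => p.1)
        (fun (p : Int × List String) => pvFields p.2) _
        (fun a _ => PySem.Dict.contains_empty _) hnd]
    rw [show (PySem.Dict.empty : PySem.Dict Int (PySem.Dict String String)).items = [] from rfl,
      List.nil_append, pv_enum_build, pv_spec_none]
    exact congrArg (List.map _) (pv_spec_build (l :: ls') [] 0).symm

theorem pv_a_eq (ls : List (List String)) :
    create_passport_dict ls = (pvSpec ls none 0).map (fun p => (p.1, p.2.items)) := by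
  have := pv_A_loop ls [] none 0 (by simp)
  simp only [pvOptEntry, List.append_nil, List.nil_append] at this
  show ((ls.foldl pvALine (PySem.Dict.empty, 0)).1.items).map _ = _
  rw [show (PySem.Dict.empty : PySem.Dict Int (PySem.Dict String String))
      = PySem.Dict.mk [] from rfl, this]

-- ===== VERDICT (by name: the statement is the Claim_ definition above) =====
theorem create_passport_dict_spec : Claim_equal_create_passport_dict := by
  intro input_file_lines _ _
  unfold Spec_create_passport_dict
  rw [pv_a_eq, pv_alt_eq]
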